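-- pv_equiv track=rewrite | github.com/zad0xlik/sigma-evolve | src/openmemory/app/utils/cross_project.py | _are_domains_similar
-- ===== SOURCE A (Python) =====
-- def _are_domains_similar(domain1: str, domain2: str) -> bool:
--     """Check if two domains are similar"""
--     domain1 = domain1.lower()
--     domain2 = domain2.lower()
--
--     # Define domain families
--     domain_families = [
--         ["web", "webapp", "website", "frontend", "backend"],
--         ["ml", "ai", "machine learning", "deep learning"],
--         ["api", "rest", "graphql", "microservice"],
--         ["data", "analytics", "etl"],
--     ]
--
--     for family in domain_families:
--         if domain1 in family and domain2 in family:
--             return True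
--
--     return False
-- ===== SOURCE B (Python) =====
-- _DOMAIN_FAMILIES = [
--     ["web", "webapp", "website", "frontend", "backend"],
--     ["ml", "ai", "machine learning", "deep learning"],
--     ["api", "rest", "graphql", "microservice"],
--     ["data", "analytics", "etl"],
-- ]
-- _FAMILY_INDEX = {term: i for i, family in enumerate(_DOMAIN_FAMILIES) for term in family}
--
--
-- def _are_domains_similar(domain1: str, domain2: str) -> bool:
--     i = _FAMILY_INDEX.get(domain1.lower())
--     return i is not None and i == _FAMILY_INDEX.get(domain2.lower())
-- ===== Notes on version B (the rewrite author's own statement) =====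
-- stated objective: idiomatic
-- what changed: Replaces the per-family double-membership loop with a term-to-family-index dict precomputed once; the function becomes two lookups and one comparison (None-guarded so two unknown domains never match).
import Mathlib
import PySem

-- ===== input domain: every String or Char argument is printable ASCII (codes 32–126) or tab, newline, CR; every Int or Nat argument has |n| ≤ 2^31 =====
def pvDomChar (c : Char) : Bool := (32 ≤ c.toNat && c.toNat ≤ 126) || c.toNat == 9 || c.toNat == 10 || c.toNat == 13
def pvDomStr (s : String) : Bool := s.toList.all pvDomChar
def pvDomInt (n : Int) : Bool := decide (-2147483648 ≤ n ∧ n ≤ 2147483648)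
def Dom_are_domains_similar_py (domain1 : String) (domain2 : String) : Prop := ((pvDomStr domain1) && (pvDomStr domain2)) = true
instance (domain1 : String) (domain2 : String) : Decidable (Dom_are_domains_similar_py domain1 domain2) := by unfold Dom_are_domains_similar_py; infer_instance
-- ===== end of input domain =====

-- B replaces A's loop over families (two list-membership tests per family) by a
-- term -> family-index dictionary built once, then two lookups and one comparison (idiomatic; not measured faster).

-- ===== PORT A =====
-- the literal domain_families list from A
def pvFamilies : List (List String) :=
  [["web", "webapp", "website", "frontend", "backend"],
   ["ml", "ai", "machine learning", "deep learning"],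
   ["api", "rest", "graphql", "microservice"],
   ["data", "analytics", "etl"]]

-- A's for-loop over domain_families: return True on the first family containing both
def pvLoopA (s1 s2 : String) : List (List String) → Bool
  | [] => false
  | f :: rest => if f.contains s1 && f.contains s2 then true else pvLoopA s1 s2 rest

def are_domains_similar_py (domain1 : String) (domain2 : String) : Bool :=
  pvLoopA (PySem.Str.lower domain1) (PySem.Str.lower domain2) pvFamilies

-- ===== PORT B =====
-- the dict comprehension {term: i for i, family in enumerate(_DOMAIN_FAMILIES) for term in family}
def pvFamilyIndex : PySem.Dict String Int :=
  (PySem.List.enumerate pvFamilies 0).foldl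
    (fun d p => p.2.foldl (fun d term => d.insert term p.1) d) PySem.Dict.empty

def are_domains_similar_py_alt (domain1 : String) (domain2 : String) : Bool :=
  match pvFamilyIndex.get? (PySem.Str.lower domain1) with
  | none => false
  | some i => pvFamilyIndex.get? (PySem.Str.lower domain2) == some i

-- ===== PRECONDITION & SPEC =====
def Spec_are_domains_similar_py (domain1 : String) (domain2 : String) (out : Bool) : Prop := out = are_domains_similar_py_alt domain1 domain2
instance (domain1 : String) (domain2 : String) (out : Bool) : Decidable (Spec_are_domains_similar_py domain1 domain2 out) := by unfold Spec_are_domains_similar_py; infer_instance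

-- ===== CLAIM (what is proved, stated in full; the proofs are below) =====
def Claim_equal_are_domains_similar_py : Prop := ∀ (domain1 : String) (domain2 : String), Dom_are_domains_similar_py domain1 domain2 → Spec_are_domains_similar_py domain1 domain2 (are_domains_similar_py domain1 domain2)

-- ===== LEMMAS AND PROOFS =====

-- the comprehension-built dict, evaluated to its literal association list
lemma pvFamilyIndex_lit : pvFamilyIndex = PySem.Dict.mk [("web",0),("webapp",0),("website",0),("frontend",0),("backend",0),("ml",1),("ai",1),("machine learning",1),("deep learning",1),("api",2),("rest",2),("graphql",2),("microservice",2),("data",3),("analytics",3),("etl",3)] := by decide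

-- every string is one of the 16 family terms, or hits neither the dict nor any family
lemma pvPick (s : String) :
    s = "web" ∨ s = "webapp" ∨ s = "website" ∨ s = "frontend" ∨ s = "backend" ∨
    s = "ml" ∨ s = "ai" ∨ s = "machine learning" ∨ s = "deep learning" ∨
    s = "api" ∨ s = "rest" ∨ s = "graphql" ∨ s = "microservice" ∨
    s = "data" ∨ s = "analytics" ∨ s = "etl" ∨
    (pvFamilyIndex.get? s = none ∧ ¬"web" = s ∧ ¬"webapp" = s ∧ ¬"website" = s ∧ ¬"frontend" = s ∧ ¬"backend" = s ∧ ¬"ml" = s ∧ ¬"ai" = s ∧ ¬"machine learning" = s ∧ ¬"deep learning" = s ∧ ¬"api" = s ∧ ¬"rest" = s ∧ ¬"graphql" = s ∧ ¬"microservice" = s ∧ ¬"data" = s ∧ ¬"analytics" = s ∧ ¬"etl" = s ∧ ¬s = "web" ∧ ¬s = "webapp" ∧ ¬s = "website" ∧ ¬s = "frontend" ∧ ¬s = "backend" ∧ ¬s = "ml" ∧ ¬s = "ai" ∧ ¬s = "machine learning" ∧ ¬s = "deep learning" ∧ ¬s = "api" ∧ ¬s = "rest" ∧ ¬s = "graphql"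 ∧ ¬s = "microservice" ∧ ¬s = "data" ∧ ¬s = "analytics" ∧ ¬s = "etl") := by
  by_cases h : s ∈ (["web","webapp","website","frontend","backend","ml","ai","machine learning","deep learning","api","rest","graphql","microservice","data","analytics","etl"] : List String)
  · simp only [List.mem_cons, List.not_mem_nil, or_false] at h
    tauto
  · simp only [List.mem_cons, List.not_mem_nil, or_false, not_or] at h
    obtain ⟨h1,h2,h3,h4,h5,h6,h7,h8,h9,h10,h11,h12,h13,h14,h15,h16⟩ := h
    refine Or.inr (Or.inr (Or.inr (Or.inr (Or.inr (Or.inr (Or.inr (Or.inr (Or.inr (Or.inr (Or.inr (Or.inr (Or.inr (Or.inr (Or.inr (Or.inr ⟨?_,Ne.symm h1,Ne.symm h2,Ne.symm h3,Ne.symm h4,Ne.symm h5,Ne.symm h6,Ne.symm h7,Ne.symm h8,Ne.symm h9,Ne.symm h10,Ne.symm h11,Ne.symm h12,Ne.symm h13,Ne.symm h14,Ne.symm h15,Ne.symm h16,h1,h2,h3,h4,h5,h6,h7,h8,h9,h10,h11,h12,h13,h14,h15,h16⟩)))))))))))))))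
    rw [pvFamilyIndex_lit]
    simp [PySem.Dict.get?, Ne.symm h1, Ne.symm h2, Ne.symm h3, Ne.symm h4, Ne.symm h5, Ne.symm h6, Ne.symm h7, Ne.symm h8, Ne.symm h9, Ne.symm h10, Ne.symm h11, Ne.symm h12, Ne.symm h13, Ne.symm h14, Ne.symm h15, Ne.symm h16]

-- A's loop equals B's two-lookup comparison, for arbitrary (already lowered) strings
set_option maxHeartbeats 4000000 in
lemma pvCore (s1 s2 : String) :
    pvLoopA s1 s2 pvFamilies =
      (match pvFamilyIndex.get? s1 with
       | none => false
       | some i => pvFamilyIndex.get? s2 == some i) := by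
  rcases pvPick s1 with rfl|rfl|rfl|rfl|rfl|rfl|rfl|rfl|rfl|rfl|rfl|rfl|rfl|rfl|rfl|rfl|h1 <;>
    rcases pvPick s2 with rfl|rfl|rfl|rfl|rfl|rfl|rfl|rfl|rfl|rfl|rfl|rfl|rfl|rfl|rfl|rfl|h2 <;>
      first
        | decide
        | simp [pvLoopA, pvFamilies, pvFamilyIndex_lit, PySem.Dict.get?, *]

-- ===== VERDICT (by name: the statement is the Claim_ definition above) =====
theorem are_domains_similar_py_spec : Claim_equal_are_domains_similar_py := by
  intro d1 d2 _
  unfold Spec_are_domains_similar_py are_domains_similar_py are_domains_similar_py_alt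
  exact pvCore _ _
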